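-- pv_equiv track=rewrite | github.com/Bimi1804/Decl.-ASAG | python_files/classes.py | __alternate_precedence_check
-- ===== SOURCE A (Python) =====
-- def __alternate_precedence_check(act_a,act_b,processed_answer):
--     """
--     Checks if the answer fulfills Alternate Precedence[A,B]
--
--     Parameters
--     ----------
--     act_a : str
--         The actual text (word) of activity A
--     act_b : str
--         The actual text (word) of activity B
--     processed_answer : str[0..*]
--         the list of processed words of the answer
--
--     Returns
--     -------
--     True -> If the answer fulfills the constraint
--     False -> If the answer does not fulfill the constraint
--     """
--     # True if B is not in the answer:
--     if act_b not in processed_answer: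
--         return True
--     # False if B is in the answer but no A is in the answer:
--     if act_b in processed_answer and act_a not in processed_answer:
--         return False
--     checking = processed_answer
--     # Check if every B is preceded by an A
--     while act_b in checking:
--         # False if B is in the remaining answer but no A:
--         if act_a not in checking:
--             return False
--         marker_b = checking.index(act_b) # index of first B
--         marker_a = checking.index(act_a) # index of first A
--         # False if A is not before B
--         if marker_b < marker_a:
--             return False
--         # continue with the remaining answer after B
--         checking = checking[marker_b+1:]
--     return True
-- ===== SOURCE B (Python) =====
-- def __alternate_precedence_check(act_a, act_b, processed_answer):
--     """Single left-to-right pass: track whether an A has been seen since the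
--     last B; every B must find the flag set, and consumes (resets) it."""
--     seen_a = False
--     for word in processed_answer:
--         if word == act_a:
--             seen_a = True
--         if word == act_b:
--             if not seen_a:
--                 return False
--             seen_a = False
--     return True
-- ===== Notes on version B (the rewrite author's own statement) =====
-- stated objective: alternative
-- what changed: Replaced the while-loop that repeatedly rescans the remaining list with membership tests, .index calls and slicing by a single left-to-right pass maintaining a seen-A flag that each B must consume.
import Mathlib
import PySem

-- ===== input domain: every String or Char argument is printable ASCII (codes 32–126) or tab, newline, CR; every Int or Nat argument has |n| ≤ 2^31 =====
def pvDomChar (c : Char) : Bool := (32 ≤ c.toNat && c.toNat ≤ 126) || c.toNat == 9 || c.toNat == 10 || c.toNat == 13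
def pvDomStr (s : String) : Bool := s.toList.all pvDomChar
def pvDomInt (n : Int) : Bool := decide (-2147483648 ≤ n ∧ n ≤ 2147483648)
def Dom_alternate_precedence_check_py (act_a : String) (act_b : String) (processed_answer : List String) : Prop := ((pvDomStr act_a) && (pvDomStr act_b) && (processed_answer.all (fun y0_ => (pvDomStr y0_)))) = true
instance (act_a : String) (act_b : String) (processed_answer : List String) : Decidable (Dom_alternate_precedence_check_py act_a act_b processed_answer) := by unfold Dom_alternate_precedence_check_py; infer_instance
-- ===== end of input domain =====

-- ===== PORT A =====
-- B replaces A's repeated rescans (membership tests, .index, slicing) by one pass with a seen-A flag.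
-- while-loop of A, recursion on the shrinking list 'checking'
def apWhile (act_a : String) (act_b : String) (checking : List String) : Bool :=
  if hb : act_b ∈ checking then
    if act_a ∉ checking then false
    else
      match hm : PySem.List.index? checking act_b with
      | none => true
      | some marker_b =>
        match PySem.List.index? checking act_a with
        | none => false
        | some marker_a =>
          if marker_b < marker_a then false
          else apWhile act_a act_b (PySem.List.slice checking (some ((marker_b : Int) + 1)) none)
  else true
termination_by checking.length
decreasing_by
  have ⟨hk, _, _⟩ := PySem.List.getElem_of_index?_eq_some hm
  have hcast : ((marker_b : Int) + 1) = ((marker_b + 1 : Nat) : Int) := by push_cast; ring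
  rw [hcast, PySem.List.slice_from_natCast]
  simp only [List.length_drop]
  omega


def alternate_precedence_check_py (act_a : String) (act_b : String) (processed_answer : List String) : Bool :=
  if act_b ∉ processed_answer then true
  else if act_b ∈ processed_answer ∧ act_a ∉ processed_answer then false
  else apWhile act_a act_b processed_answer

-- ===== PORT B =====
-- for-loop of B: 'seen' = an A has been seen since the last B

def altLoop (act_a : String) (act_b : String) (seen : Bool) : List String → Bool
  | [] => true
  | w :: ws =>
    let seen' := seen || (w == act_a)
    if w == act_b then
      if !seen' then false else altLoop act_a act_b false ws
    else altLoop act_a act_b seen' ws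


def alternate_precedence_check_py_alt (act_a : String) (act_b : String) (processed_answer : List String) : Bool :=
  altLoop act_a act_b false processed_answer

-- ===== PRECONDITION & SPEC =====
def Spec_alternate_precedence_check_py (act_a : String) (act_b : String) (processed_answer : List String) (out : Bool) : Prop := out = alternate_precedence_check_py_alt act_a act_b processed_answer
instance (act_a : String) (act_b : String) (processed_answer : List String) (out : Bool) : Decidable (Spec_alternate_precedence_check_py act_a act_b processed_answer out) := by unfold Spec_alternate_precedence_check_py; infer_instance

-- ===== CLAIM (what is proved, stated in full; the proofs are below) =====
def Claim_equal_alternate_precedence_check_py : Prop := ∀ (act_a : String) (act_b : String) (processed_answer : List String), Dom_alternate_precedence_check_py act_a act_b processed_answer → Spec_alternate_precedence_check_py act_a act_b processed_answer (alternate_precedence_check_py act_a act_b processed_answer)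

-- ===== LEMMAS AND PROOFS =====
lemma altLoop_no_b (a b : String) (s : Bool) (l : List String) (h : b ∉ l) :
    altLoop a b s l = true := by
  induction l generalizing s with
  | nil => rfl
  | cons x xs ih =>
    simp only [List.mem_cons, not_or] at h
    simp [altLoop, beq_iff_eq, Ne.symm h.1, ih _ h.2]

lemma altLoop_split (a b : String) (s : Bool) (pre rest : List String) (hb : b ∉ pre) :
    altLoop a b s (pre ++ b :: rest) =
      if s = true ∨ a ∈ pre ∨ a = b then altLoop a b false rest else false := by
  induction pre generalizing s with
  | nil =>
    simp only [List.nil_append, altLoop, beq_self_eq_true, if_true, List.not_mem_nil, false_or]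
    by_cases hab : a = b <;> cases s <;> simp_all <;>
      exact fun h => absurd h.symm hab
  | cons x pre' ih =>
    simp only [List.mem_cons, not_or] at hb
    simp only [List.cons_append, altLoop, beq_iff_eq, Ne.symm hb.1,
      ih _ hb.2, List.mem_cons]
    by_cases hxa : x = a <;> cases s <;> first | simp_all [Ne.symm hxa] | simp_all


lemma apWhile_eq_altLoop (a b : String) (l : List String) :
    apWhile a b l = altLoop a b false l := by
  induction hn : l.length using Nat.strong_induction_on generalizing l with
  | _ n ih =>
  subst hn
  by_cases hb : b ∈ l
  · obtain ⟨mb, hmb⟩ := Option.isSome_iff_exists.mp (((PySem.List.index?_isSome_iff l b).mpr hb))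
    obtain ⟨pre, suf, hdec, hlen, hbpre⟩ := ((PySem.List.index?_eq_some_iff l b mb).mp hmb)
    by_cases ha : a ∈ l
    · obtain ⟨ma, hma⟩ := Option.isSome_iff_exists.mp (((PySem.List.index?_isSome_iff l a).mpr ha))
      obtain ⟨hma_lt, hma_get, hma_min⟩ := PySem.List.getElem_of_index?_eq_some hma
      obtain ⟨hmb_lt, hmb_get, hmb_min⟩ := PySem.List.getElem_of_index?_eq_some hmb
      rw [apWhile, dif_pos hb, if_neg (by simpa using ha), hmb, hma]
      split
      · simp_all
      rename_i mb' heq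
      injection heq with heq; subst heq
      split
      · simp_all
      rename_i ma' heq
      injection heq with heq; subst heq
      by_cases hlt : mb < ma
      · -- A returns false; a ∉ pre and a ≠ b
        rw [if_pos hlt, hdec, altLoop_split a b false pre suf hbpre]
        have hapre : a ∉ pre := by
          intro hmem
          obtain ⟨j, hj, hje⟩ := List.getElem_of_mem hmem
          have hjl : j < l.length := by rw [hdec]; simp only [List.length_append, List.length_cons]; omega
          have hlj : l[j]'hjl = a := by
            rw [List.getElem_of_eq hdec, List.getElem_append_left hj]; exact hje
          exact hma_min j (by omega) hlj
        have hab : a ≠ b := by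
          intro h
          exact hma_min mb (by omega) (h ▸ hmb_get)
        simp [hapre, hab]
      · -- recurse
        rw [if_neg hlt]
        have hcast : ((mb : Int) + 1) = ((mb + 1 : Nat) : Int) := by push_cast; ring
        rw [hcast, PySem.List.slice_from_natCast]
        have hdrop : l.drop (mb + 1) = suf := by
          rw [hdec, ← hlen, show pre ++ b :: suf = (pre ++ [b]) ++ suf by simp]
          exact List.drop_left' (by simp)
        rw [hdrop]
        have hcond : a ∈ pre ∨ a = b := by
          rcases Nat.lt_or_ge ma mb with h | h
          · left
            have hpm : pre[ma]'(by omega) = a := by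
              have h2 := hma_get
              rw [List.getElem_of_eq hdec, List.getElem_append_left (by omega)] at h2
              exact h2
            exact hpm ▸ List.getElem_mem _
          · right
            have hmamb : ma = mb := by omega
            subst hmamb
            rw [← hma_get, ← hmb_get]
        rw [hdec, altLoop_split a b false pre suf hbpre, if_pos (by tauto)]
        have hsuf : suf.length < l.length := by rw [hdec]; simp; omega
        exact ih suf.length (by omega) suf rfl
    · rw [apWhile, dif_pos hb, if_pos (by simpa using ha)]
      rw [hdec, altLoop_split a b false pre suf hbpre]
      have hapre : a ∉ pre := fun h => ha (hdec ▸ List.mem_append_left _ h)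
      have hab : a ≠ b := fun h => ha (h ▸ hb)
      simp [hapre, hab]
  · rw [apWhile, dif_neg hb, altLoop_no_b a b false l hb]

-- ===== VERDICT (by name: the statement is the Claim_ definition above) =====
theorem alternate_precedence_check_py_spec : Claim_equal_alternate_precedence_check_py := by
  intro a b l _
  unfold Spec_alternate_precedence_check_py alternate_precedence_check_py alternate_precedence_check_py_alt
  by_cases hb : b ∈ l
  · by_cases ha : a ∈ l
    · rw [if_neg (by simpa using hb), if_neg (by tauto)]
      exact apWhile_eq_altLoop a b l
    · rw [if_neg (by simpa using hb), if_pos ⟨hb, ha⟩]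
      have h := apWhile_eq_altLoop a b l
      rw [apWhile, dif_pos hb, if_pos (by simpa using ha)] at h
      exact h
  · rw [if_pos (by simpa using hb)]
    exact (altLoop_no_b a b false l hb).symm
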